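-- pv_equiv track=rewrite | github.com/rodrigorahal/advent-of-code-2018 | 06/chronal_coordinates.py | internal
-- ===== SOURCE A (Python) =====
-- def internal(coordinates):
--     internals = set()
--     for (x, y) in coordinates:
--         left = right = top = bottom = None
--         for (nx, ny) in coordinates:
--             if (x, y) != (nx, ny):
--                 if x > nx:
--                     left = (nx, ny)
--                 elif x < nx:
--                     right = (nx, ny)
--                 if y > ny:
--                     top = (nx, ny)
--                 elif y < ny:
--                     bottom = (nx, ny)
--         if all((left, right, top, bottom)):
--             internals.add((x, y))
--     return internals
-- ===== SOURCE B (Python) =====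
-- def internal(coordinates):
--     # One pass for the bounding box, then keep points strictly inside it.
--     if not coordinates:
--         return set()
--     min_x = max_x = coordinates[0][0]
--     min_y = max_y = coordinates[0][1]
--     for x, y in coordinates[1:]:
--         if x < min_x:
--             min_x = x
--         if x > max_x:
--             max_x = x
--         if y < min_y:
--             min_y = y
--         if y > max_y:
--             max_y = y
--     return {(x, y) for (x, y) in coordinates
--             if min_x < x < max_x and min_y < y < max_y}
-- ===== Notes on version B (the rewrite author's own statement) =====
-- stated objective: faster
-- what changed: Replaces the quadratic all-pairs scan (for each point, scan every other point for one strictly left/right/above/below) with one pass computing the bounding box min/max and a single filter keeping points strictly inside it.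
import Mathlib
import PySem

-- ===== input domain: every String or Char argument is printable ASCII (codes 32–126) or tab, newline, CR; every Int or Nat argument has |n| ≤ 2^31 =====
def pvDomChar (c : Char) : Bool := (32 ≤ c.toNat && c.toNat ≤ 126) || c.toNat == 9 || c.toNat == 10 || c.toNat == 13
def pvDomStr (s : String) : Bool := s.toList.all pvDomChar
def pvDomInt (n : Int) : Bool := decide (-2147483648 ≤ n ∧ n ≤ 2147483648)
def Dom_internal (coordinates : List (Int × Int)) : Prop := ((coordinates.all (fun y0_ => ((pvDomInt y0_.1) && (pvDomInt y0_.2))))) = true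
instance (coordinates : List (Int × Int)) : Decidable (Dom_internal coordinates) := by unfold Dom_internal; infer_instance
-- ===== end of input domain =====

-- B replaces A's O(n^2) all-pairs scan by an O(n) bounding-box pass plus a filter; return values proved equal.

-- ===== PORT A =====
-- inner loop body of A: updates (left, right, top, bottom)
def innerA (x y : Int)
    (st : Option (Int × Int) × Option (Int × Int) × Option (Int × Int) × Option (Int × Int))
    (q : Int × Int) :
    Option (Int × Int) × Option (Int × Int) × Option (Int × Int) × Option (Int × Int) :=
  if (x, y) ≠ q then
    let lr := if x > q.1 then (some q, st.2.1)
              else if x < q.1 then (st.1, some q)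
              else (st.1, st.2.1)
    let tb := if y > q.2 then (some q, st.2.2.2)
              else if y < q.2 then (st.2.2.1, some q)
              else (st.2.2.1, st.2.2.2)
    (lr.1, lr.2, tb.1, tb.2)
  else st

def internal (coordinates : List (Int × Int)) : List (Int × Int) :=
  coordinates.foldl (fun internals p =>
    let res := coordinates.foldl (innerA p.1 p.2) (none, none, none, none)
    if res.1.isSome && res.2.1.isSome && res.2.2.1.isSome && res.2.2.2.isSome then
      PySem.Set.add internals p
    else internals) PySem.Set.empty

-- ===== PORT B =====
def internal_alt (coordinates : List (Int × Int)) : List (Int × Int) :=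
  match coordinates with
  | [] => PySem.Set.empty
  | c :: rest =>
    let b := rest.foldl (fun (b : Int × Int × Int × Int) q =>
      (if q.1 < b.1 then q.1 else b.1,
       if q.1 > b.2.1 then q.1 else b.2.1,
       if q.2 < b.2.2.1 then q.2 else b.2.2.1,
       if q.2 > b.2.2.2 then q.2 else b.2.2.2)) (c.1, c.1, c.2, c.2)
    (c :: rest).foldl (fun s p =>
      if b.1 < p.1 ∧ p.1 < b.2.1 ∧ b.2.2.1 < p.2 ∧ p.2 < b.2.2.2
      then PySem.Set.add s p else s) PySem.Set.empty

-- ===== PRECONDITION & SPEC =====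
def Spec_internal (coordinates : List (Int × Int)) (out : List (Int × Int)) : Prop := out = internal_alt coordinates
instance (coordinates : List (Int × Int)) (out : List (Int × Int)) : Decidable (Spec_internal coordinates out) := by unfold Spec_internal; infer_instance

-- ===== CLAIM (what is proved, stated in full; the proofs are below) =====
def Claim_equal_internal : Prop := ∀ (coordinates : List (Int × Int)), Dom_internal coordinates → Spec_internal coordinates (internal coordinates)

-- ===== LEMMAS AND PROOFS =====

-- one step of A's inner loop, componentwise
lemma innerA_step (x y : Int) (st : Option (Int × Int) × Option (Int × Int) × Option (Int × Int) × Option (Int × Int)) (q : Int × Int) :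
    (innerA x y st q).1.isSome = (st.1.isSome || decide (q.1 < x)) ∧
    (innerA x y st q).2.1.isSome = (st.2.1.isSome || decide (x < q.1)) ∧
    (innerA x y st q).2.2.1.isSome = (st.2.2.1.isSome || decide (q.2 < y)) ∧
    (innerA x y st q).2.2.2.isSome = (st.2.2.2.isSome || decide (y < q.2)) := by
  obtain ⟨nx, ny⟩ := q
  unfold innerA
  split_ifs <;>
    simp_all [Prod.ext_iff] <;> omega

-- A's inner loop computed over a list
lemma innerA_foldl (x y : Int) (l : List (Int × Int))
    (st : Option (Int × Int) × Option (Int × Int) × Option (Int × Int) × Option (Int × Int)) :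
    (l.foldl (innerA x y) st).1.isSome = (st.1.isSome || l.any (fun q => decide (q.1 < x))) ∧
    (l.foldl (innerA x y) st).2.1.isSome = (st.2.1.isSome || l.any (fun q => decide (x < q.1))) ∧
    (l.foldl (innerA x y) st).2.2.1.isSome = (st.2.2.1.isSome || l.any (fun q => decide (q.2 < y))) ∧
    (l.foldl (innerA x y) st).2.2.2.isSome = (st.2.2.2.isSome || l.any (fun q => decide (y < q.2))) := by
  induction l generalizing st with
  | nil => simp
  | cons q l ih =>
    obtain ⟨h1, h2, h3, h4⟩ := innerA_step x y st q
    obtain ⟨i1, i2, i3, i4⟩ := ih (innerA x y st q)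
    simp [List.foldl_cons, List.any_cons, i1, i2, i3, i4, h1, h2, h3, h4, Bool.or_assoc]

-- B's bounding-box fold, componentwise, as scalar folds
lemma boundsFold_components (l : List (Int × Int)) (a b c d : Int) :
    (l.foldl (fun (b : Int × Int × Int × Int) q =>
      (if q.1 < b.1 then q.1 else b.1,
       if q.1 > b.2.1 then q.1 else b.2.1,
       if q.2 < b.2.2.1 then q.2 else b.2.2.1,
       if q.2 > b.2.2.2 then q.2 else b.2.2.2)) (a, b, c, d)) =
    ((l.map Prod.fst).foldl (fun a q => if q < a then q else a) a,
     (l.map Prod.fst).foldl (fun a q => if q > a then q else a) b,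
     (l.map Prod.snd).foldl (fun a q => if q < a then q else a) c,
     (l.map Prod.snd).foldl (fun a q => if q > a then q else a) d) := by
  induction l generalizing a b c d with
  | nil => rfl
  | cons q l ih => simp [List.foldl_cons, ih]

lemma minFold_lt (l : List Int) (b x : Int) :
    (l.foldl (fun a q => if q < a then q else a) b < x) ↔ (b < x ∨ ∃ q ∈ l, q < x) := by
  induction l generalizing b with
  | nil => simp
  | cons q l ih =>
    simp only [List.foldl_cons, ih, List.mem_cons]
    constructor
    · rintro (h | ⟨r, hr, hrx⟩)
      · split_ifs at h with hq
        · exact Or.inr ⟨q, Or.inl rfl, h⟩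
        · exact Or.inl h
      · exact Or.inr ⟨r, Or.inr hr, hrx⟩
    · rintro (h | ⟨r, (rfl | hr), hrx⟩)
      · left; split_ifs with hq <;> omega
      · left; split_ifs with hq <;> omega
      · exact Or.inr ⟨r, hr, hrx⟩

lemma maxFold_gt (l : List Int) (b x : Int) :
    (x < l.foldl (fun a q => if q > a then q else a) b) ↔ (x < b ∨ ∃ q ∈ l, x < q) := by
  induction l generalizing b with
  | nil => simp
  | cons q l ih =>
    simp only [List.foldl_cons, ih, List.mem_cons]
    constructor
    · rintro (h | ⟨r, hr, hrx⟩)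
      · split_ifs at h with hq
        · exact Or.inr ⟨q, Or.inl rfl, h⟩
        · exact Or.inl h
      · exact Or.inr ⟨r, Or.inr hr, hrx⟩
    · rintro (h | ⟨r, (rfl | hr), hrx⟩)
      · left; split_ifs with hq <;> omega
      · left; split_ifs with hq <;> omega
      · exact Or.inr ⟨r, hr, hrx⟩

-- ===== VERDICT (by name: the statement is the Claim_ definition above) =====
theorem internal_spec : Claim_equal_internal := by
  intro coordinates _
  unfold Spec_internal internal internal_alt
  cases coordinates with
  | nil => rfl
  | cons c rest =>
    simp only [boundsFold_components]
    apply PySem.List.foldl_congr_mem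
    intro acc p _
    obtain ⟨h1, h2, h3, h4⟩ := innerA_foldl p.1 p.2 (c :: rest) (none, none, none, none)
    have E : (((((c :: rest).any (fun q => decide (q.1 < p.1)) &&
                (c :: rest).any (fun q => decide (p.1 < q.1))) &&
                (c :: rest).any (fun q => decide (q.2 < p.2))) &&
                (c :: rest).any (fun q => decide (p.2 < q.2))) = true) ↔
        ((rest.map Prod.fst).foldl (fun a q => if q < a then q else a) c.1 < p.1 ∧
         p.1 < (rest.map Prod.fst).foldl (fun a q => if q > a then q else a) c.1 ∧
         (rest.map Prod.snd).foldl (fun a q => if q < a then q else a) c.2 < p.2 ∧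
         p.2 < (rest.map Prod.snd).foldl (fun a q => if q > a then q else a) c.2) := by
      simp only [Bool.and_eq_true, List.any_eq_true, decide_eq_true_eq, minFold_lt,
        maxFold_gt, List.mem_map, List.mem_cons]
      aesop
    simp only [h1, h2, h3, h4, Option.isSome_none, Bool.false_or]
    by_cases H : ((rest.map Prod.fst).foldl (fun a q => if q < a then q else a) c.1 < p.1 ∧
         p.1 < (rest.map Prod.fst).foldl (fun a q => if q > a then q else a) c.1 ∧
         (rest.map Prod.snd).foldl (fun a q => if q < a then q else a) c.2 < p.2 ∧
         p.2 < (rest.map Prod.snd).foldl (fun a q => if q > a then q else a) c.2)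
    · rw [if_pos (E.mpr H), if_pos H]
    · rw [if_neg (fun hb => H (E.mp hb)), if_neg H]
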